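-- pv_equiv track=rewrite | github.com/xlateai/xos | src/core/apps/study/study.py | _kana_line_with_lime_reading
-- ===== SOURCE A (Python) =====
-- def _kana_line_with_lime_reading(kana_line, vk):
--     """Sentence kana row: occurrences of vocab reading ``vk`` in lime, rest muted ``&7``."""
--     ks = str(kana_line)
--     vk = str(vk) if vk is not None else ""
--     if not vk or vk not in ks:
--         return f"&7{ks}&r"
--     parts = ks.split(vk)
--     chunks = []
--     for i, p in enumerate(parts):
--         if p:
--             chunks.append(f"&7{p}&r")
--         if i < len(parts) - 1:
--             chunks.append(f"&a&l{vk}&r")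
--     return "".join(chunks)
-- ===== SOURCE B (Python) =====
-- def _kana_line_with_lime_reading(kana_line, vk):
--     """Cursor-based forward scan instead of split/enumerate: chop the string at each
--     occurrence of vk, emitting muted and lime chunks as we go."""
--     ks = str(kana_line)
--     vk = str(vk) if vk is not None else ""
--     if not vk or vk not in ks:
--         return f"&7{ks}&r"
--     out = []
--     rest = ks
--     while True:
--         idx = rest.find(vk)
--         if idx == -1:
--             if rest:
--                 out.append(f"&7{rest}&r")
--             return "".join(out)
--         pre = rest[:idx]
--         if pre:
--             out.append(f"&7{pre}&r")
--         out.append(f"&a&l{vk}&r")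
--         rest = rest[idx + len(vk):]
-- ===== Notes on version B (the rewrite author's own statement) =====
-- stated objective: alternative
-- what changed: Replaced the split/parts-list/enumerate decomposition with a cursor-based forward scan that repeatedly calls find and slices off the prefix and the matched occurrence, so no parts list or index bookkeeping is built.
import Mathlib
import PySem

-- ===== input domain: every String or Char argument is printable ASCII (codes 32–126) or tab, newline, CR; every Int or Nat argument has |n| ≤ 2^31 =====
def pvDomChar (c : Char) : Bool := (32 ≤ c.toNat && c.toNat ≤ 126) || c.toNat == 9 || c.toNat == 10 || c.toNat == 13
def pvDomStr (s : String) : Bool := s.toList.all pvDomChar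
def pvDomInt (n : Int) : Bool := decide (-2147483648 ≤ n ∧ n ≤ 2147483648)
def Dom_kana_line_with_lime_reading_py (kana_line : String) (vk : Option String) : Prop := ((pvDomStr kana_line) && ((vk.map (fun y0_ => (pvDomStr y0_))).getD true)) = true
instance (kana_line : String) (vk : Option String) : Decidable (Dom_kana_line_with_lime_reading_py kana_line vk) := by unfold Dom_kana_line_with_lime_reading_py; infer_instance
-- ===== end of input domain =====

-- B rewrites A's split/enumerate decomposition as a cursor-based forward scan with find (alternative decomposition; return value only).

-- chunk builders shared by both ports (the f-string pieces "&7…&r" and "&a&l…&r")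
def pvMute (p : List Char) : List Char := '&' :: '7' :: (p ++ ['&', 'r'])
def pvLime (vkl : List Char) : List Char := '&' :: 'a' :: '&' :: 'l' :: (vkl ++ ['&', 'r'])

-- ===== PORT A =====
def kana_line_with_lime_reading_py (kana_line : String) (vk : Option String) : String :=
  let ksl := kana_line.toList
  let vkl := (vk.getD "").toList
  if vkl = [] ∨ PySem.Chars.isIn vkl ksl = false then
    String.mk (pvMute ksl)
  else
    let parts := PySem.Chars.splitOn ksl vkl
    let chunks := (PySem.List.enumerate parts).foldl
      (fun ch ip =>
        let ch' := if ip.2 ≠ [] then ch ++ [pvMute ip.2] else ch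
        if ip.1 < PySem.List.len parts - 1 then ch' ++ [pvLime vkl] else ch') []
    String.mk (PySem.Chars.join [] chunks)

-- ===== PORT B =====
-- the while-loop of Source B: idx = rest.find(vk); emit chunks; rest = rest[idx+len(vk):]
def pvScan (vkl : List Char) (hvk : vkl ≠ []) (rest : List Char) : List (List Char) :=
  let idx := PySem.Chars.find rest vkl
  if hidx : idx = -1 then
    if rest ≠ [] then [pvMute rest] else []
  else
    let pre := PySem.List.slice rest none (some idx)
    (if pre ≠ [] then [pvMute pre] else []) ++
      pvLime vkl :: pvScan vkl hvk (PySem.List.slice rest (some (idx + PySem.Chars.len vkl)) none)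
termination_by rest.length
decreasing_by
  have hinf : vkl <:+: rest := (PySem.Chars.find_ne_neg_one_iff rest vkl).mp hidx
  have h0 : 0 ≤ PySem.Chars.find rest vkl := (PySem.Chars.find_nonneg_iff rest vkl).mpr hinf
  have hrest : rest ≠ [] := by
    intro h; subst h
    exact hvk (List.eq_nil_of_infix_nil hinf)
  have hlen : 0 < vkl.length := List.length_pos_iff.mpr hvk
  rw [PySem.List.slice_from]
  · simp only [List.length_drop]
    have : 0 < rest.length := List.length_pos_iff.mpr hrest
    have : 0 < (PySem.Chars.find rest vkl + PySem.Chars.len vkl).toNat := by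
      simp [PySem.Chars.len_eq]; omega
    omega
  · simp [PySem.Chars.len_eq]; omega

def kana_line_with_lime_reading_py_alt (kana_line : String) (vk : Option String) : String :=
  let ksl := kana_line.toList
  let vkl := (vk.getD "").toList
  if h : vkl = [] ∨ PySem.Chars.isIn vkl ksl = false then
    String.mk (pvMute ksl)
  else
    String.mk (PySem.Chars.join [] (pvScan vkl (fun he => h (Or.inl he)) ksl))

-- ===== PRECONDITION & SPEC =====
def Spec_kana_line_with_lime_reading_py (kana_line : String) (vk : Option String) (out : String) : Prop := out = kana_line_with_lime_reading_py_alt kana_line vk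
instance (kana_line : String) (vk : Option String) (out : String) : Decidable (Spec_kana_line_with_lime_reading_py kana_line vk out) := by unfold Spec_kana_line_with_lime_reading_py; infer_instance

-- ===== CLAIM (what is proved, stated in full; the proofs are below) =====
def Claim_equal_kana_line_with_lime_reading_py : Prop := ∀ (kana_line : String) (vk : Option String), Dom_kana_line_with_lime_reading_py kana_line vk → Spec_kana_line_with_lime_reading_py kana_line vk (kana_line_with_lime_reading_py kana_line vk)

-- ===== LEMMAS AND PROOFS =====

-- the clean recursive shape of Chars.splitOn (for sep ≠ [])
def pvParts (vkl : List Char) (hvk : vkl ≠ []) (cs : List Char) : List (List Char) :=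
  let idx := PySem.Chars.find cs vkl
  if hidx : idx = -1 then [cs]
  else cs.take idx.toNat :: pvParts vkl hvk (cs.drop (idx.toNat + vkl.length))
termination_by cs.length
decreasing_by
  have hinf : vkl <:+: cs := (PySem.Chars.find_ne_neg_one_iff cs vkl).mp hidx
  have hcs : cs ≠ [] := by
    intro h; subst h; exact hvk (List.eq_nil_of_infix_nil hinf)
  have hlen : 0 < vkl.length := List.length_pos_iff.mpr hvk
  have : 0 < cs.length := List.length_pos_iff.mpr hcs
  simp only [List.length_drop]; omega

-- the chunk list A's enumerate-fold produces from a parts list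
def pvChunksOf (vkl : List Char) : List (List Char) → List (List Char)
  | [] => []
  | [p] => if p ≠ [] then [pvMute p] else []
  | p :: q :: ps => (if p ≠ [] then [pvMute p] else []) ++ pvLime vkl :: pvChunksOf vkl (q :: ps)

theorem pvFindGo_nil (sub : List Char) (k : Nat) :
    PySem.Chars.find.go sub [] k = if sub.isEmpty then (k : Int) else -1 := by
  simp [PySem.Chars.find.go]

theorem pvFindGo_cons (sub : List Char) (c : Char) (t : List Char) (k : Nat) :
    PySem.Chars.find.go sub (c :: t) k =
      if sub.isPrefixOf (c :: t) then (k : Int) else PySem.Chars.find.go sub t (k + 1) := by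
  simp [PySem.Chars.find.go]

theorem pvFindGo_shift (sub : List Char) (hsub : sub ≠ []) :
    ∀ (l : List Char) (k : Nat), PySem.Chars.find.go sub l k =
      if PySem.Chars.find.go sub l 0 = -1 then -1 else PySem.Chars.find.go sub l 0 + k := by
  intro l
  induction l with
  | nil => intro k; simp [pvFindGo_nil, List.isEmpty_iff, hsub]
  | cons c t ih =>
    intro k
    rw [pvFindGo_cons, pvFindGo_cons]
    by_cases hp : sub.isPrefixOf (c :: t)
    · simp [hp]
    · simp only [hp, if_false]
      rw [ih (k + 1), ih 1]
      have hge : -1 ≤ PySem.Chars.find.go sub t 0 := by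
        have := PySem.Chars.neg_one_le_find t sub
        simpa [PySem.Chars.find] using this
      by_cases h1 : PySem.Chars.find.go sub t 0 = -1
      · simp [h1]
      · simp only [if_neg h1]
        push_cast
        rw [if_neg (by omega : ¬ (PySem.Chars.find.go sub t 0 + 1 = -1))]
        ring

theorem pvFind_nil (sub : List Char) (hsub : sub ≠ []) : PySem.Chars.find [] sub = -1 := by
  simp [PySem.Chars.find, pvFindGo_nil, List.isEmpty_iff, hsub]

theorem pvFind_cons (sub : List Char) (hsub : sub ≠ []) (c : Char) (t : List Char) :
    PySem.Chars.find (c :: t) sub =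
      if sub.isPrefixOf (c :: t) then 0
      else if PySem.Chars.find t sub = -1 then -1 else PySem.Chars.find t sub + 1 := by
  simp only [PySem.Chars.find]
  rw [pvFindGo_cons]
  by_cases hp : sub.isPrefixOf (c :: t)
  · simp [hp]
  · simp only [hp, if_false]
    rw [pvFindGo_shift sub hsub t 1]
    push_cast; rfl

-- head-augmentation of a parts list (splitOn.go's cur buffer prepended to the first part)
def pvAug (pre : List Char) : List (List Char) → List (List Char)
  | [] => [pre]
  | p :: ps => (pre ++ p) :: ps

theorem pvParts_ne_nil (vkl : List Char) (hvk : vkl ≠ []) (cs : List Char) :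
    pvParts vkl hvk cs ≠ [] := by
  rw [pvParts]
  by_cases h : PySem.Chars.find cs vkl = -1 <;> simp [h]

theorem pvAug_nil (ps : List (List Char)) (h : ps ≠ []) : pvAug [] ps = ps := by
  cases ps with
  | nil => exact absurd rfl h
  | cons p t => simp [pvAug]

theorem pvGo_spec (vkl : List Char) (hvk : vkl ≠ []) :
    ∀ (fuel : Nat) (l cur : List Char) (acc : List (List Char)), l.length < fuel →
      PySem.Chars.splitOn.go vkl fuel l cur acc =
        acc.reverse ++ pvAug cur.reverse (pvParts vkl hvk l) := by
  intro fuel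
  induction fuel with
  | zero => intro l cur acc h; omega
  | succ fuel ih =>
    intro l cur acc h
    cases l with
    | nil =>
      rw [PySem.Chars.splitOn.go]
      · rw [pvParts]
        simp [pvFind_nil vkl hvk, pvAug]
      · omega
    | cons c rest =>
      rw [PySem.Chars.splitOn.go]
      have hlen : 0 < vkl.length := List.length_pos_iff.mpr hvk
      by_cases hp : vkl.isPrefixOf (c :: rest)
      · simp only [hp, if_true]
        have hfind : PySem.Chars.find (c :: rest) vkl = 0 := by
          rw [pvFind_cons vkl hvk]; simp [hp]
        rw [ih _ _ _ (by simp only [List.length_drop]; simp at h ⊢; omega)]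
        rw [List.reverse_nil, pvAug_nil _ (pvParts_ne_nil vkl hvk _)]
        conv_rhs => rw [pvParts]
        simp [hfind, pvAug]
      · rw [if_neg (by simp [hp])]
        rw [ih _ _ _ (by simp at h ⊢; omega)]
        have hfc := pvFind_cons vkl hvk c rest
        have hge : -1 ≤ PySem.Chars.find rest vkl := PySem.Chars.neg_one_le_find rest vkl
        conv_rhs => rw [pvParts]
        by_cases h1 : PySem.Chars.find rest vkl = -1
        · have hfind : PySem.Chars.find (c :: rest) vkl = -1 := by rw [hfc]; simp [hp, h1]
          rw [show pvParts vkl hvk rest = [rest] from by rw [pvParts]; simp [h1]]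
          simp [hfind, pvAug]
        · have h0 : 0 ≤ PySem.Chars.find rest vkl := by omega
          have h2 : ¬ (PySem.Chars.find rest vkl + 1 = -1) := by omega
          have hfind : PySem.Chars.find (c :: rest) vkl = PySem.Chars.find rest vkl + 1 := by
            rw [hfc]; simp [hp, h1]
          have htn : (PySem.Chars.find rest vkl + 1).toNat = (PySem.Chars.find rest vkl).toNat + 1 := by
            omega
          have harr : (PySem.Chars.find rest vkl + 1).toNat + vkl.length
              = ((PySem.Chars.find rest vkl).toNat + vkl.length) + 1 := by omega
          rw [show pvParts vkl hvk rest =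
              rest.take (PySem.Chars.find rest vkl).toNat ::
                pvParts vkl hvk (rest.drop ((PySem.Chars.find rest vkl).toNat + vkl.length)) from by
            rw [pvParts]; simp [h1]]
          simp [hfind, h2, htn, pvAug, List.take_succ_cons]
          rw [show (PySem.Chars.find rest vkl).toNat + 1 + vkl.length
              = ((PySem.Chars.find rest vkl).toNat + vkl.length) + 1 from by omega,
            List.drop_succ_cons]

theorem pvSplitOn_eq_parts (vkl : List Char) (hvk : vkl ≠ []) (cs : List Char) :
    PySem.Chars.splitOn cs vkl = pvParts vkl hvk cs := by
  rw [PySem.Chars.splitOn, pvGo_spec vkl hvk (cs.length + 1) cs [] [] (by omega)]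
  cases hp : pvParts vkl hvk cs with
  | nil => exact absurd hp (pvParts_ne_nil vkl hvk cs)
  | cons p ps => simp [pvAug]

-- A's enumerate-fold over a suffix qs starting at index s (with s + |qs| = N) builds pvChunksOf
theorem pvFoldEnum (vkl : List Char) (N : Int) :
    ∀ (qs : List (List Char)) (s : Int) (acc : List (List Char)), qs ≠ [] → s + qs.length = N →
      (PySem.List.enumerate qs s).foldl
        (fun ch ip =>
          let ch' := if ip.2 ≠ [] then ch ++ [pvMute ip.2] else ch
          if ip.1 < N - 1 then ch' ++ [pvLime vkl] else ch') acc
      = acc ++ pvChunksOf vkl qs := by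
  intro qs
  induction qs with
  | nil => intro s acc h _; exact absurd rfl h
  | cons p t ih =>
    intro s acc _ hN
    cases t with
    | nil =>
      have hs : ¬ (s < N - 1) := by simp at hN; omega
      simp [PySem.List.enumerate_cons, PySem.List.enumerate_nil, pvChunksOf, hs]
      by_cases hp : p = [] <;> simp [hp]
    | cons q ts =>
      have hs : s < N - 1 := by simp at hN; omega
      rw [PySem.List.enumerate_cons]
      simp only [List.foldl_cons]
      rw [ih (s + 1) _ (by simp) (by simp at hN ⊢; omega)]
      simp only [pvChunksOf, hs, if_true]
      by_cases hp : p = [] <;> simp [hp]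

theorem pvChunks_eq_scan (vkl : List Char) (hvk : vkl ≠ []) (cs : List Char) :
    pvChunksOf vkl (pvParts vkl hvk cs) = pvScan vkl hvk cs := by
  have hlen : 0 < vkl.length := List.length_pos_iff.mpr hvk
  induction hn : cs.length using Nat.strong_induction_on generalizing cs with
  | _ n ih =>
  subst hn
  rw [pvParts, pvScan]
  by_cases h1 : PySem.Chars.find cs vkl = -1
  · simp only [dif_pos h1]
    cases hc : cs with
    | nil => simp [pvChunksOf]
    | cons a b => simp [pvChunksOf]
  · have hinf : vkl <:+: cs := (PySem.Chars.find_ne_neg_one_iff cs vkl).mp h1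
    have hcs : cs ≠ [] := by
      intro h; subst h; exact hvk (List.eq_nil_of_infix_nil hinf)
    have h0 : 0 ≤ PySem.Chars.find cs vkl := (PySem.Chars.find_nonneg_iff cs vkl).mpr hinf
    simp only [dif_neg h1]
    have hslice1 : PySem.List.slice cs none (some (PySem.Chars.find cs vkl)) =
        cs.take (PySem.Chars.find cs vkl).toNat := PySem.List.slice_to cs h0
    have hslice2 : PySem.List.slice cs (some (PySem.Chars.find cs vkl + PySem.Chars.len vkl)) none =
        cs.drop ((PySem.Chars.find cs vkl).toNat + vkl.length) := by
      rw [PySem.List.slice_from cs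
        (a := PySem.Chars.find cs vkl + PySem.Chars.len vkl)
        (by simp only [PySem.Chars.len_eq]; omega)]
      congr 1
      simp only [PySem.Chars.len_eq]
      omega
    rw [hslice1, hslice2]
    have hrec : pvChunksOf vkl (pvParts vkl hvk (cs.drop ((PySem.Chars.find cs vkl).toNat + vkl.length)))
        = pvScan vkl hvk (cs.drop ((PySem.Chars.find cs vkl).toNat + vkl.length)) := by
      refine ih (cs.drop ((PySem.Chars.find cs vkl).toNat + vkl.length)).length ?_ _ rfl
      have h3 : 0 < cs.length := List.length_pos_iff.mpr hcs
      first
      | omega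
      | (simp only [List.length_drop]; omega)
    cases hp : pvParts vkl hvk (cs.drop ((PySem.Chars.find cs vkl).toNat + vkl.length)) with
    | nil => exact absurd hp (pvParts_ne_nil vkl hvk _)
    | cons r rs =>
      rw [hp] at hrec
      simp only [pvChunksOf, hrec]

-- ===== VERDICT (by name: the statement is the Claim_ definition above) =====
theorem kana_line_with_lime_reading_py_spec : Claim_equal_kana_line_with_lime_reading_py := by
  intro kana_line vk _
  unfold Spec_kana_line_with_lime_reading_py
  unfold kana_line_with_lime_reading_py kana_line_with_lime_reading_py_alt
  by_cases h : (vk.getD "").toList = [] ∨ PySem.Chars.isIn ((vk.getD "").toList) kana_line.toList = false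
  · simp only []
    rw [if_pos h, dif_pos h]
  · simp only []
    rw [if_neg h, dif_neg h]
    congr 1
    have hvk : (vk.getD "").toList ≠ [] := fun he => h (Or.inl he)
    rw [pvSplitOn_eq_parts _ hvk]
    rw [pvFoldEnum ((vk.getD "").toList) (PySem.List.len (pvParts ((vk.getD "").toList) hvk kana_line.toList))
      (pvParts ((vk.getD "").toList) hvk kana_line.toList) 0 [] (pvParts_ne_nil _ hvk _) (by simp [PySem.List.len_eq])]
    rw [List.nil_append]
    exact congrArg _ (pvChunks_eq_scan _ hvk _)
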